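-- pv_equiv track=rewrite | github.com/CodeBishop/beholder | behold.py | cutToEllipsis
-- ===== SOURCE A (Python) =====
-- CEC = "%%%"  # Escape code for colored or special text
--
-- CECLEN = 1  # Number of chars after a color escape code
--
-- def CECStringLength(text):
--     return len(text) - text.count(CEC) * (len(CEC) + CECLEN)
--
-- def cutToEllipsis(text, maxLength):
--     if CECStringLength(text) > maxLength:
--         ellipsis = ".."
--         newText = ""
--         newLength = 0
--         i = 0
--         while newLength < maxLength - len(ellipsis):
--             # If next part of string is a CEC code then append it but don't count it
--             if text[i:i+len(CEC)] == CEC: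
--                 newText += text[i:i+len(CEC) + CECLEN]
--                 i += len(CEC) + CECLEN
--             # Else it's a normal character and just append it
--             else:
--                 newText += text[i]
--                 i += 1
--                 newLength += 1
--         # Return excess string with an ellipsis tacked on at the end
--         return newText + ellipsis
--     # If the given string didn't exceed the max length then return it as-is
--     else:
--         return text
-- ===== SOURCE B (Python) =====
-- CEC = "%%%"  # Escape code for colored or special text
--
-- CECLEN = 1  # Number of chars after a color escape code
--
--
-- def CECStringLength(text):
--     return len(text) - text.count(CEC) * (len(CEC) + CECLEN)
--
--
-- def _tokens(text):
--     """Split text into units: a CEC plus its trailing char (not counted), or one char (counted)."""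
--     toks = []
--     while text:
--         if text.startswith(CEC):
--             toks.append((text[:len(CEC) + CECLEN], False))
--             text = text[len(CEC) + CECLEN:]
--         else:
--             toks.append((text[0], True))
--             text = text[1:]
--     return toks
--
--
-- def cutToEllipsis(text, maxLength):
--     if CECStringLength(text) <= maxLength:
--         return text
--     limit = maxLength - 2
--     parts = []
--     n = 0
--     for tok, counted in _tokens(text):
--         if n >= limit:
--             break
--         parts.append(tok)
--         if counted:
--             n += 1
--     return "".join(parts) + ".."
-- ===== Notes on version B (the rewrite author's own statement) =====
-- stated objective: alternative
-- what changed: Replaces A's single index-arithmetic while loop (slicing and counting in one interleaved state machine) by a two-phase decomposition: first tokenize the whole string into (unit, counted) tokens by repeated prefix stripping, then select tokens with an early-exit fold until the counted-character budget maxLength-2 is spent, joining at the end.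
import Mathlib
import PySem

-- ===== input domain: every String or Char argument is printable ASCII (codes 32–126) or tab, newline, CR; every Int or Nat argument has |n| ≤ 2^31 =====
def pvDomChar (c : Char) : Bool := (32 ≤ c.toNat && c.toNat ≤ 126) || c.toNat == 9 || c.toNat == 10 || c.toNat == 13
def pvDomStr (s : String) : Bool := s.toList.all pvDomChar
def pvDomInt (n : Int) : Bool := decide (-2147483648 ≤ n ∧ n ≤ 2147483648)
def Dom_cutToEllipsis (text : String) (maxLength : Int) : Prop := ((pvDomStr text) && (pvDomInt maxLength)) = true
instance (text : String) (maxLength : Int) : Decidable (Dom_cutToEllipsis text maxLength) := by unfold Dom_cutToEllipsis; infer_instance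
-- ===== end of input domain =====

-- B replaces A's interleaved index/count while-loop by tokenize-then-select (alternative decomposition, same cost).

-- ===== PORT A =====
-- CECStringLength: len(text) - text.count("%%%") * (3 + 1); str.count is PySem.Str.count.
def CECStringLength (text : String) : Int :=
  (PySem.Str.len text) - (PySem.Str.count text "%%%" : Int) * (3 + 1)

-- A's while loop; i is the Python index (always ≥ 0). text[i:i+3] / text[i:i+4] with nonnegative
-- bounds are exactly (drop i).take 3 / (drop i).take 4 (PySem.List.slice_natCast_add); text[i] is
-- l[i]?, none being Python's IndexError. The extra fuel argument (called with l.length + 2, one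
-- unit per iteration since i grows each turn) only makes the recursion structural; fuel
-- exhaustion (none) and IndexError (none) are both proved unreachable below (loop_eq).
def loopA (l : List Char) (maxLength : Int) : Nat → List Char → Int → Nat → Option (List Char)
  | 0, _, _, _ => none
  | fuel + 1, newText, newLength, i =>
    if newLength < maxLength - 2 then
      if (l.drop i).take 3 = ['%', '%', '%'] then
        loopA l maxLength fuel (newText ++ (l.drop i).take (3 + 1)) newLength (i + (3 + 1))
      else
        match l[i]? with
        | some c => loopA l maxLength fuel (newText ++ [c]) (newLength + 1) (i + 1)
        | none => none
    else some newText

def cutToEllipsis (text : String) (maxLength : Int) : String :=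
  if CECStringLength text > maxLength then
    match loopA text.toList maxLength (text.toList.length + 2) [] 0 0 with
    | some newText => String.ofList (newText ++ ['.', '.'])
    | none => ""   -- Python raises IndexError here; proved unreachable (loop_eq below)
  else text

-- ===== PORT B =====
-- _tokens(text): repeated prefix stripping; text.startswith("%%%") is List.isPrefixOf.
-- Fuel (called with the text's length, one unit per produced token) makes the recursion structural.
def tokensB : Nat → List Char → List (List Char × Bool)
  | 0, _ => []
  | _ + 1, [] => []
  | fuel + 1, c :: rest =>
    if ['%', '%', '%'].isPrefixOf (c :: rest) then
      ((c :: rest).take (3 + 1), false) :: tokensB fuel ((c :: rest).drop (3 + 1))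
    else
      ([c], true) :: tokensB fuel rest

-- the for-loop over tokens with break; "".join of the appended parts is their concatenation.
def buildB : List (List Char × Bool) → Int → Int → List Char
  | [], _, _ => []
  | (tok, counted) :: rest, limit, n =>
    if n ≥ limit then []
    else tok ++ buildB rest limit (if counted then n + 1 else n)

def cutToEllipsis_alt (text : String) (maxLength : Int) : String :=
  if CECStringLength text ≤ maxLength then text
  else String.ofList
    (buildB (tokensB text.toList.length text.toList) (maxLength - 2) 0 ++ ['.', '.'])

-- ===== PRECONDITION & SPEC =====
def Spec_cutToEllipsis (text : String) (maxLength : Int) (out : String) : Prop := out = cutToEllipsis_alt text maxLength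
instance (text : String) (maxLength : Int) (out : String) : Decidable (Spec_cutToEllipsis text maxLength out) := by unfold Spec_cutToEllipsis; infer_instance

-- ===== CLAIM (what is proved, stated in full; the proofs are below) =====
def Claim_equal_cutToEllipsis : Prop := ∀ (text : String) (maxLength : Int), Dom_cutToEllipsis text maxLength → Spec_cutToEllipsis text maxLength (cutToEllipsis text maxLength)

-- ===== LEMMAS AND PROOFS =====

-- number of counted tokens in a token list
def nsTok (toks : List (List Char × Bool)) : Nat := (toks.filter (fun t => t.2)).length

-- greedy non-overlapping count of "%%%" (fueled mirror of PySem.Chars.count.go without the accumulator)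
def cG : Nat → List Char → Nat
  | 0, _ => 0
  | _ + 1, [] => 0
  | fuel + 1, c :: rest =>
    if ['%', '%', '%'].isPrefixOf (c :: rest) then 1 + cG fuel ((c :: rest).drop 3)
    else cG fuel rest

theorem count_go_eq (fuel : Nat) (l : List Char) (acc : Nat) :
    PySem.Chars.count.go ['%', '%', '%'] fuel l acc = acc + cG fuel l := by
  induction fuel generalizing l acc with
  | zero => rw [PySem.Chars.count.go.eq_def]; rfl
  | succ fuel ih =>
    cases l with
    | nil => rw [PySem.Chars.count.go.eq_def]; rfl
    | cons c r =>
      rw [PySem.Chars.count.go.eq_def]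
      show (if ['%', '%', '%'].isPrefixOf (c :: r) = true then
          PySem.Chars.count.go ['%', '%', '%'] fuel (List.drop (['%', '%', '%'] : List Char).length (c :: r)) (acc + 1)
        else PySem.Chars.count.go ['%', '%', '%'] fuel r acc) = acc + cG (fuel + 1) (c :: r)
      have hl3 : (['%', '%', '%'] : List Char).length = 3 := rfl
      rw [hl3, cG]
      by_cases hp : (['%', '%', '%'] : List Char).isPrefixOf (c :: r) = true
      · rw [if_pos hp, if_pos hp, ih]; omega
      · rw [if_neg hp, if_neg hp, ih]

theorem chars_count_eq (l : List Char) :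
    PySem.Chars.count l ['%', '%', '%'] = cG l.length l := by
  rw [PySem.Chars.count, if_neg (by simp), count_go_eq, Nat.zero_add]

theorem cG_stable (f1 : Nat) : ∀ (f2 : Nat) (l : List Char), l.length ≤ f1 → l.length ≤ f2 →
    cG f1 l = cG f2 l := by
  induction f1 with
  | zero =>
    intro f2 l h1 _
    have : l = [] := List.eq_nil_of_length_eq_zero (by omega)
    subst this
    cases f2 <;> rfl
  | succ f1 ih =>
    intro f2 l h1 h2
    cases l with
    | nil => cases f2 <;> rfl
    | cons c r =>
      cases f2 with
      | zero => simp at h2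
      | succ f2 =>
        rw [cG, cG]
        by_cases hp : (['%', '%', '%'] : List Char).isPrefixOf (c :: r) = true
        · rw [if_pos hp, if_pos hp,
            ih f2 _ (by simp only [List.length_drop, List.length_cons] at *; omega)
              (by simp only [List.length_drop, List.length_cons] at *; omega)]
        · rw [if_neg hp, if_neg hp,
            ih f2 _ (by simp at h1; omega) (by simp at h2; omega)]

theorem tokensB_stable (f1 : Nat) : ∀ (f2 : Nat) (l : List Char), l.length ≤ f1 → l.length ≤ f2 →
    tokensB f1 l = tokensB f2 l := by
  induction f1 with
  | zero =>
    intro f2 l h1 _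
    have : l = [] := List.eq_nil_of_length_eq_zero (by omega)
    subst this
    cases f2 <;> rfl
  | succ f1 ih =>
    intro f2 l h1 h2
    cases l with
    | nil => cases f2 <;> rfl
    | cons c r =>
      cases f2 with
      | zero => simp at h2
      | succ f2 =>
        rw [tokensB, tokensB]
        by_cases hp : (['%', '%', '%'] : List Char).isPrefixOf (c :: r) = true
        · rw [if_pos hp, if_pos hp,
            ih f2 _ (by simp only [List.length_drop, List.length_cons] at *; omega)
              (by simp only [List.length_drop, List.length_cons] at *; omega)]
        · rw [if_neg hp, if_neg hp,
            ih f2 _ (by simp at h1; omega) (by simp at h2; omega)]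

theorem cG_cons (l : List Char) (x : Char) : ∀ (f1 f2 : Nat), l.length ≤ f1 →
    l.length + 1 ≤ f2 → cG f1 l ≤ cG f2 (x :: l) := by
  induction hn : l.length using Nat.strong_induction_on generalizing l x with
  | _ n ih =>
  subst hn
  intro f1 f2 h1 h2
  cases f2 with
  | zero => simp at h2
  | succ g =>
    by_cases hp : (['%', '%', '%'] : List Char).isPrefixOf (x :: l) = true
    · rw [cG, if_pos hp]
      cases l with
      | nil => simp [List.isPrefixOf] at hp
      | cons a r =>
        cases r with
        | nil => simp [List.isPrefixOf] at hp
        | cons b s =>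
          simp only [List.isPrefixOf, Bool.and_true,
            Bool.and_eq_true, beq_iff_eq] at hp
          obtain ⟨hx, ha, hb⟩ := hp
          subst hx; subst ha; subst hb
          simp only [List.drop_succ_cons, List.drop_zero]
          -- ⊢ cG f1 ('%' :: '%' :: s) ≤ 1 + cG g s
          cases f1 with
          | zero => simp at h1
          | succ e =>
            by_cases hp2 : (['%', '%', '%'] : List Char).isPrefixOf ('%' :: '%' :: s) = true
            · rw [cG, if_pos hp2]
              cases s with
              | nil => simp [List.isPrefixOf] at hp2
              | cons d u =>
                simp only [List.isPrefixOf, Bool.and_true,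
                  Bool.and_eq_true, beq_iff_eq] at hp2
                obtain ⟨_, _, hd⟩ := hp2
                subst hd
                simp only [List.drop_succ_cons, List.drop_zero]
                have := ih u.length (by simp; omega) u '%' rfl e g
                  (by simp only [List.length_cons] at h1; omega)
                  (by simp only [List.length_cons] at h2; omega)
                omega
            · rw [cG, if_neg hp2]
              -- ⊢ cG e ('%' :: s) ≤ 1 + cG g s
              cases e with
              | zero => cases s <;> simp [cG]
              | succ e' =>
                have hp3 : ¬ (['%', '%', '%'] : List Char).isPrefixOf ('%' :: s) = true := by
                  intro hcon
                  apply hp2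
                  have hcon' := List.isPrefixOf_iff_prefix.mp hcon
                  rw [List.cons_prefix_cons] at hcon'
                  have hone : (['%'] : List Char) <+: s :=
                    List.IsPrefix.trans ⟨['%'], rfl⟩ hcon'.2
                  exact List.isPrefixOf_iff_prefix.mpr
                    (List.cons_prefix_cons.mpr ⟨rfl, List.cons_prefix_cons.mpr ⟨rfl, hone⟩⟩)
                rw [cG, if_neg hp3]
                have hs1 : s.length ≤ e' := by simp only [List.length_cons] at h1; omega
                have hs2 : s.length ≤ g := by simp only [List.length_cons] at h2; omega
                rw [cG_stable e' g s hs1 hs2]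
                omega
    · rw [cG, if_neg hp]
      rw [cG_stable f1 g l h1 (by omega)]

theorem cecsl_le_nsTok (l : List Char) : ∀ (f1 f2 : Nat), l.length ≤ f1 → l.length ≤ f2 →
    (l.length : Int) - 4 * cG f1 l ≤ nsTok (tokensB f2 l) := by
  induction hn : l.length using Nat.strong_induction_on generalizing l with
  | _ n ih =>
  subst hn
  intro f1 f2 h1 h2
  cases l with
  | nil =>
    cases f1 <;> cases f2 <;> simp [cG, tokensB, nsTok]
  | cons c r =>
    cases f1 with
    | zero => simp at h1
    | succ e =>
      cases f2 with
      | zero => simp at h2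
      | succ g =>
        rw [cG, tokensB]
        by_cases hp : (['%', '%', '%'] : List Char).isPrefixOf (c :: r) = true
        · rw [if_pos hp, if_pos hp]
          cases r with
          | nil => simp [List.isPrefixOf] at hp
          | cons a r' =>
            cases r' with
            | nil => simp [List.isPrefixOf] at hp
            | cons b s =>
              have hdrop3 : (c :: a :: b :: s).drop 3 = s := rfl
              rw [hdrop3]
              cases s with
              | nil =>
                have hd4 : (c :: a :: b :: ([] : List Char)).drop (3 + 1) = ([] : List Char) := rfl
                rw [hd4]
                have hcg : cG e ([] : List Char) = 0 := by cases e <;> rfl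
                have htk : tokensB g ([] : List Char) = [] := by cases g <;> rfl
                rw [hcg, htk]
                simp [nsTok]
              | cons d s' =>
                have hd4 : (c :: a :: b :: d :: s').drop (3 + 1) = s' := rfl
                rw [hd4]
                have hns : nsTok (((c :: a :: b :: d :: s').take (3 + 1), false) :: tokensB g s') =
                    nsTok (tokensB g s') := by simp [nsTok]
                rw [hns]
                have hIH := ih s'.length (by simp; omega) s' rfl s'.length g le_rfl
                  (by simp only [List.length_cons] at h2; omega)
                have hcons := cG_cons s' d s'.length e le_rfl
                  (by simp only [List.length_cons] at h1; omega)
                simp only [List.length_cons]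
                push_cast
                omega
        · rw [if_neg hp, if_neg hp]
          have hns : nsTok (([c], true) :: tokensB g r) = nsTok (tokensB g r) + 1 := by
            simp [nsTok]
          rw [hns]
          have hIH := ih r.length (by simp) r rfl e g
            (by simp only [List.length_cons] at h1; omega)
            (by simp only [List.length_cons] at h2; omega)
          simp only [List.length_cons]
          push_cast
          omega

theorem take3_iff_prefix (s : List Char) :
    s.take 3 = ['%', '%', '%'] ↔ (['%', '%', '%'] : List Char).isPrefixOf s = true := by
  rw [List.isPrefixOf_iff_prefix]
  constructor
  · intro h
    exact ⟨s.drop 3, by rw [← h, List.take_append_drop]⟩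
  · intro h
    exact (List.prefix_iff_eq_take.mp h).symm

theorem buildB_of_ge (toks : List (List Char × Bool)) (limit n : Int) (h : limit ≤ n) :
    buildB toks limit n = [] := by
  cases toks with
  | nil => rfl
  | cons t rest =>
    obtain ⟨tok, counted⟩ := t
    rw [buildB, if_pos (by omega)]

theorem loop_eq (l : List Char) (maxLength : Int) : ∀ (fuel i : Nat) (newText : List Char)
    (newLength : Int), i ≤ l.length + 1 → l.length + 2 - i ≤ fuel →
    maxLength - 2 - newLength ≤ (nsTok (tokensB (l.drop i).length (l.drop i)) : Int) →
    loopA l maxLength fuel newText newLength i =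
      some (newText ++ buildB (tokensB (l.drop i).length (l.drop i)) (maxLength - 2) newLength) := by
  intro fuel
  induction fuel with
  | zero => intro i _ _ hi hf _; omega
  | succ fuel ih =>
    intro i newText newLength hi hf hns
    by_cases hlt : newLength < maxLength - 2
    · cases hd : l.drop i with
      | nil =>
        rw [hd] at hns
        simp [tokensB, nsTok] at hns
        omega
      | cons c rest =>
        have hi' : i < l.length := by
          by_contra hge
          rw [List.drop_eq_nil_of_le (by omega)] at hd
          simp at hd
        by_cases hp : (['%', '%', '%'] : List Char).isPrefixOf (c :: rest) = true
        · -- CEC token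
          have htake : (l.drop i).take 3 = ['%', '%', '%'] := by
            rw [hd]; exact (take3_iff_prefix _).mpr hp
          have hlen3 : 3 ≤ (l.drop i).length := by
            have : ((l.drop i).take 3).length = 3 := by rw [htake]; rfl
            simp only [List.length_take] at this
            omega
          have hlendrop : (l.drop i).length = l.length - i := List.length_drop ..
          rw [loopA, if_pos hlt, if_pos htake]
          have htok : tokensB (l.drop i).length (l.drop i) =
              (((c :: rest).take (3 + 1), false) ::
                tokensB rest.length ((c :: rest).drop (3 + 1))) := by
            rw [hd]; rw [show (c :: rest).length = rest.length + 1 from rfl, tokensB, if_pos hp]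
          have hdrop4 : l.drop (i + (3 + 1)) = (c :: rest).drop (3 + 1) := by
            rw [← hd, ← List.drop_drop]
          have hstab : tokensB rest.length ((c :: rest).drop (3 + 1)) =
              tokensB ((c :: rest).drop (3 + 1)).length ((c :: rest).drop (3 + 1)) := by
            apply tokensB_stable
            · simp only [List.length_drop, List.length_cons]; omega
            · exact le_rfl
          have hns' : maxLength - 2 - newLength ≤
              (nsTok (tokensB (l.drop (i + (3 + 1))).length (l.drop (i + (3 + 1)))) : Int) := by
            rw [hdrop4, ← hstab]
            rw [htok] at hns
            simpa [nsTok] using hns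
          rw [ih (i + (3 + 1)) (newText ++ (l.drop i).take (3 + 1)) newLength
            (by omega) (by omega) hns']
          have htok2 : tokensB (c :: rest).length (c :: rest) =
              (((c :: rest).take (3 + 1), false) ::
                tokensB rest.length ((c :: rest).drop (3 + 1))) := by
            rw [show (c :: rest).length = rest.length + 1 from rfl, tokensB, if_pos hp]
          rw [htok2, buildB, if_neg (by omega)]
          rw [hd, hdrop4, hstab]
          simp [List.append_assoc]
        · -- normal character
          have htake : ¬ (l.drop i).take 3 = ['%', '%', '%'] := by
            rw [hd]
            intro hcon
            exact hp ((take3_iff_prefix _).mp hcon)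
          have hget : l[i]? = some c := by
            have h0 : (l.drop i)[0]? = l[i + 0]? := List.getElem?_drop
            rw [hd] at h0
            simpa using h0.symm
          rw [loopA, if_pos hlt, if_neg htake, hget]
          show loopA l maxLength fuel (newText ++ [c]) (newLength + 1) (i + 1) = _
          have htok : tokensB (l.drop i).length (l.drop i) =
              (([c], true) :: tokensB rest.length rest) := by
            rw [hd]; rw [show (c :: rest).length = rest.length + 1 from rfl, tokensB, if_neg hp]
          have hdrop1 : l.drop (i + 1) = rest := by
            rw [← List.drop_drop, hd]
            rfl
          have hns' : maxLength - 2 - (newLength + 1) ≤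
              (nsTok (tokensB (l.drop (i + 1)).length (l.drop (i + 1))) : Int) := by
            rw [hdrop1]
            rw [htok] at hns
            simp only [nsTok, List.filter_cons] at hns
            simp only [nsTok]
            simp at hns
            omega
          rw [ih (i + 1) (newText ++ [c]) (newLength + 1) (by omega) (by omega) hns']
          have htok2 : tokensB (c :: rest).length (c :: rest) =
              (([c], true) :: tokensB rest.length rest) := by
            rw [show (c :: rest).length = rest.length + 1 from rfl, tokensB, if_neg hp]
          rw [htok2, buildB, if_neg (by omega)]
          rw [hdrop1]
          simp [List.append_assoc]
    · rw [loopA, if_neg hlt, buildB_of_ge _ _ _ (by omega)]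
      simp

-- ===== VERDICT (by name: the statement is the Claim_ definition above) =====
theorem cutToEllipsis_spec : Claim_equal_cutToEllipsis := by
  unfold Claim_equal_cutToEllipsis Spec_cutToEllipsis
  intro text maxLength _
  unfold cutToEllipsis cutToEllipsis_alt
  by_cases hg : CECStringLength text > maxLength
  · rw [if_pos hg, if_neg (by omega)]
    have hcnt : CECStringLength text =
        (text.toList.length : Int) - (cG text.toList.length text.toList : Int) * (3 + 1) := by
      unfold CECStringLength
      rw [PySem.Str.count]
      have hpat : ("%%%" : String).toList = ['%', '%', '%'] := rfl
      rw [hpat, chars_count_eq]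
      have hlen : PySem.Str.len text = (text.toList.length : Int) := by
        rw [PySem.Str.len_eq]
      rw [hlen]
    have hns := cecsl_le_nsTok text.toList text.toList.length text.toList.length le_rfl le_rfl
    have h := loop_eq text.toList maxLength (text.toList.length + 2) 0 [] 0
      (by omega) (by omega) (by rw [List.drop_zero]; omega)
    rw [List.drop_zero] at h
    rw [h]
    simp
  · rw [if_neg hg, if_pos (by omega)]
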